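-- pv_equiv track=rewrite | github.com/JustWon/PerformancOrderGen | main.py | cal_cost
-- ===== SOURCE A (Python) =====
-- def pre_performance(p_order,cur_idx):
--     if cur_idx-1 >= 0:
--         return p_order[cur_idx-1]
--     return []
--
-- def next_performance(p_order,cur_idx):
--     if cur_idx+1 < len(p_order)-1:
--         return p_order[cur_idx+1]
--     return []
--
-- def cal_cost(p_order):
--
--     cost = 0
--     for idx, p in enumerate(p_order):
--         for individual in p:
--             if individual in pre_performance(p_order, idx):
--                 cost+=1
--             if individual in next_performance(p_order, idx):
--                 cost+=1
--     return cost, p_order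
-- ===== SOURCE B (Python) =====
-- def cal_cost(p_order):
--     # Build a multiset index of occurrences keyed by (performance index, individual),
--     # then make one pass over the distinct keys: each occurrence count contributes
--     # once per neighbouring performance that also contains the individual.
--     occ = {}
--     for i, p in enumerate(p_order):
--         for x in p:
--             occ[(i, x)] = occ.get((i, x), 0) + 1
--     n = len(p_order)
--     cost = 0
--     for (i, x), c in occ.items():
--         if (i - 1, x) in occ:
--             cost += c
--         if (i + 1, x) in occ and i + 1 < n - 1:
--             cost += c
--     return cost, p_order
-- ===== Notes on version B (the rewrite author's own statement) =====
-- stated objective: alternative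
-- what changed: B replaces A's per-element neighbour-list scans by a different algorithm: it builds an occurrence-count index keyed by (performance index, individual) in one pass, then sums over the distinct keys, adding each key's multiplicity once per adjacent index present in the index (forward only when i+1 < len-1, matching A's next_performance bound); no neighbour list is ever scanned.
import Mathlib
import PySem

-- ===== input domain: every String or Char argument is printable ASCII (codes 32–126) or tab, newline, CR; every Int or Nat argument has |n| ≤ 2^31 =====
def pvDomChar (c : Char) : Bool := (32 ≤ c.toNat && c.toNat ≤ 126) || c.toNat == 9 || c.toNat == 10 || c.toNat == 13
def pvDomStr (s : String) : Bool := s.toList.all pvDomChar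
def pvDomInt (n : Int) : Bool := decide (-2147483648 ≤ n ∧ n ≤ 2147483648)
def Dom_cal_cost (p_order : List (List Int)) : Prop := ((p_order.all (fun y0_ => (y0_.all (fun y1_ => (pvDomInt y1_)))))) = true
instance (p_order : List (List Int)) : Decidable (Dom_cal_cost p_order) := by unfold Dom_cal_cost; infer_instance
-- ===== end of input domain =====

-- B replaces A's per-element neighbour-list scans by an occurrence index keyed by
-- (performance index, individual) built once, then a single pass over its distinct keys;
-- same return value (alternative algorithm, not claimed faster).

-- ===== PORT A =====
-- p_order[cur_idx-1]: index is in range at every call site (0 ≤ cur_idx-1 < len), so pyGetD with a default is exact here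
def pre_performance (p_order : List (List Int)) (cur_idx : Int) : List Int :=
  if cur_idx - 1 ≥ 0 then PySem.List.pyGetD p_order (cur_idx - 1) [] else []

-- p_order[cur_idx+1]: likewise always in range when the guard holds
def next_performance (p_order : List (List Int)) (cur_idx : Int) : List Int :=
  if cur_idx + 1 < (p_order.length : Int) - 1 then PySem.List.pyGetD p_order (cur_idx + 1) [] else []

def cal_cost (p_order : List (List Int)) : Int × List (List Int) :=
  let cost : Int := (PySem.List.enumerate p_order).foldl
    (fun cost ip =>
      ip.2.foldl (fun cost individual =>
        let cost := if individual ∈ pre_performance p_order ip.1 then cost + 1 else cost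
        if individual ∈ next_performance p_order ip.1 then cost + 1 else cost) cost) 0
  (cost, p_order)

-- ===== PORT B =====
def cal_cost_alt (p_order : List (List Int)) : Int × List (List Int) :=
  let occ : PySem.Dict (Int × Int) Int :=
    (PySem.List.enumerate p_order).foldl
      (fun occ ip =>
        ip.2.foldl (fun occ x => occ.insert (ip.1, x) (occ.getD (ip.1, x) 0 + 1)) occ)
      PySem.Dict.empty
  let n : Int := p_order.length
  let cost : Int := occ.items.foldl
    (fun cost kv =>
      let cost := if occ.contains (kv.1.1 - 1, kv.1.2) then cost + kv.2 else cost
      if occ.contains (kv.1.1 + 1, kv.1.2) ∧ kv.1.1 + 1 < n - 1 then cost + kv.2 else cost)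
    0
  (cost, p_order)

-- ===== PRECONDITION & SPEC =====
def Spec_cal_cost (p_order : List (List Int)) (out : Int × List (List Int)) : Prop := out = cal_cost_alt p_order
instance (p_order : List (List Int)) (out : Int × List (List Int)) : Decidable (Spec_cal_cost p_order out) := by unfold Spec_cal_cost; infer_instance

-- ===== CLAIM (what is proved, stated in full; the proofs are below) =====
def Claim_equal_cal_cost : Prop := ∀ (p_order : List (List Int)), Dom_cal_cost p_order → Spec_cal_cost p_order (cal_cost p_order)

-- ===== LEMMAS AND PROOFS =====

-- all occurrences of individuals, tagged with their performance index (with multiplicity)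
def allpairs (p : List (List Int)) : List (Int × Int) :=
  (PySem.List.enumerate p).flatMap (fun ip => ip.2.map (fun x => (ip.1, x)))

-- the common summand: 1 for a shared previous neighbour, 1 for a shared next neighbour
def termA (p : List (List Int)) (ix : Int × Int) : Int :=
  (if ix.2 ∈ pre_performance p ix.1 then (1:Int) else 0)
  + (if ix.2 ∈ next_performance p ix.1 then (1:Int) else 0)

-- a 0/1-indicator sum over a Nodup list containing a picks out g a
theorem sum_single {α : Type} [DecidableEq α] (S : List α) (hS : S.Nodup) (a : α)
    (ha : a ∈ S) (g : α → Int) :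
    (S.map (fun k => if k = a then g k else 0)).sum = g a := by
  induction S with
  | nil => simp at ha
  | cons s S' ihS =>
    rcases List.mem_cons.mp ha with h1 | h1
    · subst h1
      have hz : ∀ k ∈ S', (if k = a then g k else 0) = 0 := by
        intro k hk
        have : k ≠ a := fun he => (List.nodup_cons.mp hS).1 (he ▸ hk)
        simp [this]
      simp [List.map_congr_left hz]
    · have hs : s ≠ a := fun he => (List.nodup_cons.mp hS).1 (he ▸ h1)
      simp only [List.map_cons, List.sum_cons, if_neg hs, zero_add]
      exact ihS (List.nodup_cons.mp hS).2 h1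

-- summing over a Nodup superset with multiplicities = summing over the list itself
theorem sum_count_mul {α : Type} [BEq α] [LawfulBEq α] [DecidableEq α] (S : List α) (hS : S.Nodup)
    (l : List α) (h : ∀ y ∈ l, y ∈ S) (g : α → Int) :
    (S.map (fun k => (l.count k : Int) * g k)).sum = (l.map g).sum := by
  induction l with
  | nil => simp
  | cons a t ih =>
    have ha : a ∈ S := h a (by simp)
    have ht : ∀ y ∈ t, y ∈ S := fun y hy => h y (by simp [hy])
    have hcount : ∀ k, ((a :: t).count k : Int) * g k
        = (t.count k : Int) * g k + (if k = a then g k else 0) := by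
      intro k
      by_cases hk : k = a
      · subst hk; simp; ring
      · simp [hk, Ne.symm hk]
    rw [List.map_congr_left (fun k _ => hcount k)]
    rw [List.sum_map_add]
    rw [ih ht]
    rw [sum_single S hS a ha g]
    simp [List.map_cons]
    ring

-- the occurrence dict B builds is Counter(allpairs)
theorem occ_eq_counter (p : List (List Int)) :
    (PySem.List.enumerate p).foldl
      (fun occ ip =>
        ip.2.foldl (fun occ x => occ.insert (ip.1, x) (occ.getD (ip.1, x) 0 + 1)) occ)
      PySem.Dict.empty
      = PySem.Dict.counter (allpairs p) := by
  rw [← PySem.Dict.foldl_insert_getD_add_one_eq_counter, allpairs, List.foldl_flatMap]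
  simp only [List.foldl_map]

-- membership in allpairs characterised by indexing
theorem mem_allpairs (p : List (List Int)) (j x : Int) :
    (j, x) ∈ allpairs p ↔ ∃ (k : Nat) (hk : k < p.length), j = (k : Int) ∧ x ∈ p[k] := by
  simp only [allpairs, List.mem_flatMap, PySem.List.mem_enumerate_iff, List.mem_map]
  constructor
  · rintro ⟨ip, ⟨k, hk, rfl⟩, y, hy, hxy⟩
    simp only [Prod.mk.injEq] at hxy
    exact ⟨k, hk, by omega, hxy.2 ▸ hy⟩
  · rintro ⟨k, hk, rfl, hx⟩
    exact ⟨((k : Int), p[k]), ⟨k, hk, by simp⟩, x, hx, by simp⟩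

-- A's inner loop over one performance, as a sum of indicators
theorem innerA (p : List (List Int)) (i : Int) (l : List Int) (c : Int) :
    l.foldl (fun cost x =>
        let cost := if x ∈ pre_performance p i then cost + 1 else cost
        if x ∈ next_performance p i then cost + 1 else cost) c
    = c + (l.map (fun x => termA p (i, x))).sum := by
  induction l generalizing c with
  | nil => simp
  | cons a t ih =>
    simp only [List.foldl_cons, List.map_cons, List.sum_cons, ih, termA]
    split_ifs <;> ring

-- A's outer loop over the enumerated performances
theorem outerA (p : List (List Int)) (t : List (Int × List Int)) (c : Int) :
    t.foldl (fun cost ip =>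
      ip.2.foldl (fun cost individual =>
        let cost := if individual ∈ pre_performance p ip.1 then cost + 1 else cost
        if individual ∈ next_performance p ip.1 then cost + 1 else cost) cost) c
    = c + (t.map (fun ip => (ip.2.map (fun x => termA p (ip.1, x))).sum)).sum := by
  induction t generalizing c with
  | nil => simp
  | cons a t ih =>
    rw [List.foldl_cons, innerA, ih]
    simp only [List.map_cons, List.sum_cons]
    ring

-- A's cost as a sum over allpairs
theorem costA_eq (p : List (List Int)) :
    (cal_cost p).1 = ((allpairs p).map (termA p)).sum := by
  simp only [cal_cost]
  rw [outerA]
  rw [allpairs, List.map_flatMap, List.flatMap_def, List.sum_flatten, List.map_map]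
  simp [Function.comp_def]

-- B's summation loop over the dict items, as a sum of indicator terms
theorem foldB (occ : PySem.Dict (Int × Int) Int) (n : Int)
    (l : List ((Int × Int) × Int)) (c : Int) :
    l.foldl (fun cost kv =>
      let cost := if occ.contains (kv.1.1 - 1, kv.1.2) then cost + kv.2 else cost
      if occ.contains (kv.1.1 + 1, kv.1.2) ∧ kv.1.1 + 1 < n - 1 then cost + kv.2 else cost) c
    = c + (l.map (fun kv =>
        (if occ.contains (kv.1.1 - 1, kv.1.2) then kv.2 else 0)
        + (if occ.contains (kv.1.1 + 1, kv.1.2) ∧ kv.1.1 + 1 < n - 1 then kv.2 else 0))).sum := by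
  induction l generalizing c with
  | nil => simp
  | cons a t ih =>
    simp only [List.foldl_cons, List.map_cons, List.sum_cons, ih]
    split_ifs <;> ring

-- pointwise: B's index-lookup indicators agree with A's neighbour-membership indicators
theorem point_eq (p : List (List Int)) (ix : Int × Int) (h : ix ∈ allpairs p) :
    (if (allpairs p).contains (ix.1 - 1, ix.2) then (1:Int) else 0)
    + (if (allpairs p).contains (ix.1 + 1, ix.2) ∧ ix.1 + 1 < (p.length : Int) - 1 then (1:Int) else 0)
    = termA p ix := by
  obtain ⟨j, x⟩ := ix
  obtain ⟨k, hk, rfl, hx⟩ := (mem_allpairs p j x).mp h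
  have h1 : ((allpairs p).contains ((k : Int) - 1, x) = true) ↔ x ∈ pre_performance p (k : Int) := by
    rw [List.contains_iff_mem]
    rcases Nat.eq_zero_or_pos k with hk0 | hk0
    · subst hk0
      simp only [pre_performance]
      rw [if_neg (by omega)]
      simp only [List.not_mem_nil, iff_false]
      intro hc
      obtain ⟨k', hk', he, _⟩ := (mem_allpairs p _ x).mp hc
      omega
    · have hcast : (k : Int) - 1 = ((k - 1 : Nat) : Int) := by omega
      simp only [pre_performance]
      rw [if_pos (by omega), hcast, PySem.List.pyGetD_natCast,
        List.getD_eq_getElem p [] (by omega), mem_allpairs]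
      constructor
      · rintro ⟨k', hk', he, hm⟩
        have hkk : k' = k - 1 := by omega
        subst hkk; exact hm
      · intro hm; exact ⟨k - 1, by omega, rfl, hm⟩
  have h2 : ((allpairs p).contains ((k : Int) + 1, x) = true ∧ (k : Int) + 1 < (p.length : Int) - 1)
      ↔ x ∈ next_performance p (k : Int) := by
    rw [List.contains_iff_mem]
    by_cases hb : (k : Int) + 1 < (p.length : Int) - 1
    · have hcast : (k : Int) + 1 = ((k + 1 : Nat) : Int) := by omega
      simp only [next_performance]
      rw [if_pos hb, hcast, PySem.List.pyGetD_natCast,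
        List.getD_eq_getElem p [] (by omega), mem_allpairs]
      constructor
      · rintro ⟨⟨k', hk', he, hm⟩, _⟩
        have hkk : k' = k + 1 := by omega
        subst hkk; exact hm
      · intro hm; exact ⟨⟨k + 1, by omega, by omega, hm⟩, hb⟩
    · simp only [next_performance]
      rw [if_neg hb]
      simp only [List.not_mem_nil, iff_false]
      rintro ⟨_, hb'⟩
      exact hb hb'
  simp only [termA]
  rw [if_congr h1 rfl rfl, if_congr h2 rfl rfl]

-- B's cost as the same sum over allpairs
theorem costB_eq (p : List (List Int)) :
    (cal_cost_alt p).1 = ((allpairs p).map (termA p)).sum := by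
  simp only [cal_cost_alt, occ_eq_counter]
  rw [foldB, PySem.Dict.items_counter, List.map_map, zero_add]
  have hterm : ∀ k ∈ PySem.Set.ofList (allpairs p),
      ((fun kv : (Int × Int) × Int =>
        (if (PySem.Dict.counter (allpairs p)).contains (kv.1.1 - 1, kv.1.2) then kv.2 else 0)
        + (if (PySem.Dict.counter (allpairs p)).contains (kv.1.1 + 1, kv.1.2) ∧
            kv.1.1 + 1 < (p.length : Int) - 1 then kv.2 else 0)) ∘
        (fun k => (k, ((allpairs p).count k : Int)))) k
      = ((allpairs p).count k : Int) *
        ((if (allpairs p).contains (k.1 - 1, k.2) then (1:Int) else 0)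
        + (if (allpairs p).contains (k.1 + 1, k.2) ∧ k.1 + 1 < (p.length : Int) - 1 then (1:Int) else 0)) := by
    intro k _
    simp only [Function.comp_apply, PySem.Dict.contains_counter]
    split_ifs <;> ring
  rw [List.map_congr_left hterm]
  have hs := sum_count_mul (PySem.Set.ofList (allpairs p)) (PySem.Set.nodup_ofList _)
    (allpairs p) (fun y hy => (PySem.Set.mem_ofList _ y).mpr hy)
    (fun k => (if (allpairs p).contains (k.1 - 1, k.2) then (1:Int) else 0)
      + (if (allpairs p).contains (k.1 + 1, k.2) ∧ k.1 + 1 < (p.length : Int) - 1 then (1:Int) else 0))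
  exact hs.trans (congrArg List.sum (List.map_congr_left (fun ix hix => point_eq p ix hix)))

-- ===== VERDICT (by name: the statement is the Claim_ definition above) =====
theorem cal_cost_spec : Claim_equal_cal_cost := by
  intro p _
  show cal_cost p = cal_cost_alt p
  have h1 : (cal_cost p).2 = p := rfl
  have h2 : (cal_cost_alt p).2 = p := rfl
  have := (costA_eq p).trans (costB_eq p).symm
  exact Prod.ext this (h1.trans h2.symm)
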